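-- pv_equiv track=rewrite | github.com/nayyershahzad/wiring-diagram | src/parsers/flexible_parser.py | infer_io_type_from_instrument_type
-- ===== SOURCE A (Python) =====
-- INSTRUMENT_TYPE_IO_MAPPING = {
--     # Analog Inputs
--     'PIT': 'AI', 'TIT': 'AI', 'FIT': 'AI', 'LIT': 'AI', 'AIT': 'AI',
--     'PDT': 'AI', 'WIT': 'AI', 'VIT': 'AI', 'SIT': 'AI', 'TE': 'AI',
--     'PT': 'AI', 'TT': 'AI', 'FT': 'AI', 'LT': 'AI', 'AT': 'AI',
--     'ET': 'AI', 'IT': 'AI',  # Common transmitter types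
--
--     # Analog Outputs
--     'TY': 'AO', 'PY': 'AO', 'FY': 'AO', 'LY': 'AO',
--     'TV': 'AO', 'PV': 'AO', 'FV': 'AO', 'LV': 'AO',  # Control valves
--
--     # Digital Inputs
--     'ZS': 'DI', 'ZSC': 'DI', 'ZSO': 'DI', 'RZSO': 'DI', 'RZSC': 'DI',
--     'MZSO': 'DI', 'MZSC': 'DI', 'EZSO': 'DI', 'EZSC': 'DI',
--     'BZSO': 'DI', 'BZSC': 'DI',
--     'PSL': 'DI', 'PSH': 'DI', 'PSLL': 'DI', 'PSHH': 'DI',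
--     'LSL': 'DI', 'LSH': 'DI', 'LSLL': 'DI', 'LSHH': 'DI',
--     'TSL': 'DI', 'TSH': 'DI', 'TSLL': 'DI', 'TSHH': 'DI',
--     'FS': 'DI', 'FSL': 'DI', 'FSH': 'DI',
--     'XS': 'DI', 'MXS': 'DI',  # General switches
--
--     # Digital Outputs
--     'XV': 'DO', 'XY': 'DO', 'SOV': 'DO', 'SV': 'DO',
--     'RSOV': 'DO', 'MOV': 'DO',  # Valves/solenoids
-- }
--
-- def infer_io_type_from_instrument_type(inst_type: str) -> str:
--     """Infer I/O type from instrument type."""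
--     if not inst_type:
--         return ''
--
--     inst_type = inst_type.strip().upper()
--
--     # Direct lookup
--     if inst_type in INSTRUMENT_TYPE_IO_MAPPING:
--         return INSTRUMENT_TYPE_IO_MAPPING[inst_type]
--
--     # Try prefix matching for longer types
--     for prefix in sorted(INSTRUMENT_TYPE_IO_MAPPING.keys(), key=len, reverse=True):
--         if inst_type.startswith(prefix):
--             return INSTRUMENT_TYPE_IO_MAPPING[prefix]
--
--     return ''
-- ===== SOURCE B (Python) =====
-- # One pass over the key table (grouped by I/O class), keeping the longest
-- # matching prefix: no sort, no separate direct-lookup branch.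
-- _IO_KEY_GROUPS = [
--     ('AI', 'PIT TIT FIT LIT AIT PDT WIT VIT SIT TE PT TT FT LT AT ET IT'),
--     ('AO', 'TY PY FY LY TV PV FV LV'),
--     ('DI', 'ZS ZSC ZSO RZSO RZSC MZSO MZSC EZSO EZSC BZSO BZSC'
--            ' PSL PSH PSLL PSHH LSL LSH LSLL LSHH TSL TSH TSLL TSHH'
--            ' FS FSL FSH XS MXS'),
--     ('DO', 'XV XY SOV SV RSOV MOV'),
-- ]
--
--
-- def infer_io_type_from_instrument_type(inst_type: str) -> str:
--     """Infer I/O type from instrument type."""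
--     if not inst_type:
--         return ''
--
--     inst_type = inst_type.strip().upper()
--
--     best_len = 0
--     best_io = ''
--     for io, keys in _IO_KEY_GROUPS:
--         for key in keys.split():
--             if best_len < len(key) and inst_type.startswith(key):
--                 best_len = len(key)
--                 best_io = io
--     return best_io
-- ===== Notes on version B (the rewrite author's own statement) =====
-- stated objective: simpler
-- what changed: B drops A's direct-lookup branch and its scan over the dict's keys sorted by length, and instead makes one pass over a key table grouped by I/O class, keeping the longest matching prefix in a (best_len, best_io) accumulator; no dict and no sort.
import Mathlib
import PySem

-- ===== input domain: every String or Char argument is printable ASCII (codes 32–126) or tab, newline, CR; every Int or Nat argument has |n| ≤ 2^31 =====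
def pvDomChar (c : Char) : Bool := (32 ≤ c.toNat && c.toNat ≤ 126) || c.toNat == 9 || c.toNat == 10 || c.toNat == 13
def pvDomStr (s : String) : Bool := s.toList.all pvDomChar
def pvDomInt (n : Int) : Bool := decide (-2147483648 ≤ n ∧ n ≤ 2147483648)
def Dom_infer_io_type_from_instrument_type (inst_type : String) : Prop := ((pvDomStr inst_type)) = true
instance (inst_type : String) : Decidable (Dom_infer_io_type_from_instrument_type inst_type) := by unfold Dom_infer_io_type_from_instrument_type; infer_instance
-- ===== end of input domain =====

-- B replaces A's direct dict lookup plus scan over the length-sorted key list by a single pass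
-- over a key table grouped by I/O class, keeping the longest matching prefix (simpler: no dict, no sort).

-- ===== PORT A =====
-- the module-level INSTRUMENT_TYPE_IO_MAPPING, in Python insertion order
def pvSPairs : List (String × String) := [("PIT", "AI"), ("TIT", "AI"), ("FIT", "AI"), ("LIT", "AI"), ("AIT", "AI"), ("PDT", "AI"), ("WIT", "AI"), ("VIT", "AI"), ("SIT", "AI"), ("TE", "AI"), ("PT", "AI"), ("TT", "AI"), ("FT", "AI"), ("LT", "AI"), ("AT", "AI"), ("ET", "AI"), ("IT", "AI"), ("TY", "AO"), ("PY", "AO"), ("FY", "AO"), ("LY", "AO"), ("TV", "AO"), ("PV", "AO"), ("FV", "AO"), ("LV", "AO"), ("ZS", "DI"), ("ZSC", "DI"), ("ZSO", "DI"), ("RZSO", "DI"), ("RZSC", "DI"), ("MZSO", "DI"), ("MZSC", "DI"), ("EZSO", "DI"), ("EZSC", "DI"), ("BZSO", "DI"), ("BZSC", "DI"), ("PSL", "DI"), ("PSH", "DI"), ("PSLL", "DI"), ("PSHH", "DI"), ("LSL", "DI"), ("LSH", "DI"), ("LSLL", "DI"), ("LSHH", "DI"), ("TSL", "DI"), ("TSH",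 "DI"), ("TSLL", "DI"), ("TSHH", "DI"), ("FS", "DI"), ("FSL", "DI"), ("FSH", "DI"), ("XS", "DI"), ("MXS", "DI"), ("XV", "DO"), ("XY", "DO"), ("SOV", "DO"), ("SV", "DO"), ("RSOV", "DO"), ("MOV", "DO")]

def pvIOMap : PySem.Dict String String := PySem.Dict.ofList pvSPairs

-- the 'for prefix in sorted(...)' loop with its early return
def pvScanA (t : String) : List String → String
  | [] => ""
  | p :: ps =>
      if PySem.Str.startswith t p then (PySem.Dict.get? pvIOMap p).getD "" else pvScanA t ps

def infer_io_type_from_instrument_type (inst_type : String) : String :=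
  if inst_type == "" then ""
  else
    let t := PySem.Str.upper (PySem.Str.strip inst_type)
    if PySem.Dict.contains pvIOMap t then (PySem.Dict.get? pvIOMap t).getD ""
    else
      pvScanA t (PySem.List.sorted (PySem.Dict.keys pvIOMap) (fun k => PySem.Str.len k) true)

-- ===== PORT B =====
-- the module-level _IO_KEY_GROUPS of Source B: per I/O class, the keys in one space-separated string
def pvIOGroups : List (String × String) := [("AI", "PIT TIT FIT LIT AIT PDT WIT VIT SIT TE PT TT FT LT AT ET IT"), ("AO", "TY PY FY LY TV PV FV LV"), ("DI", "ZS ZSC ZSO RZSO RZSC MZSO MZSC EZSO EZSC BZSO BZSC PSL PSH PSLL PSHH LSL LSH LSLL LSHH TSL TSH TSLL TSHH FS FSL FSH XS MXS"), ("DO", "XV XY SOV SV RSOV MOV")]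

-- the 'for io, keys in _IO_KEY_GROUPS: for key in keys.split(): …' double loop, (best_len, best_io) accumulator
def infer_io_type_from_instrument_type_alt (inst_type : String) : String :=
  if inst_type == "" then ""
  else
    let t := PySem.Str.upper (PySem.Str.strip inst_type)
    (pvIOGroups.foldl
      (fun acc g =>
        (PySem.Str.split₀ g.2).foldl
          (fun acc key =>
            if acc.1 < PySem.Str.len key ∧ PySem.Str.startswith t key = true then
              (PySem.Str.len key, g.1)
            else acc)
          acc)
      ((0 : Int), "")).2

-- ===== PRECONDITION & SPEC =====
def Spec_infer_io_type_from_instrument_type (inst_type : String) (out : String) : Prop := out = infer_io_type_from_instrument_type_alt inst_type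
instance (inst_type : String) (out : String) : Decidable (Spec_infer_io_type_from_instrument_type inst_type out) := by unfold Spec_infer_io_type_from_instrument_type; infer_instance

-- ===== CLAIM (what is proved, stated in full; the proofs are below) =====
def Claim_equal_infer_io_type_from_instrument_type : Prop := ∀ (inst_type : String), Dom_infer_io_type_from_instrument_type inst_type → Spec_infer_io_type_from_instrument_type inst_type (infer_io_type_from_instrument_type inst_type)

-- ===== LEMMAS AND PROOFS =====

-- list-level mirror of A's table and of A's scan (cs is t.toList)
def pvPairs : List (List Char × String) := pvSPairs.map (fun p => (p.1.toList, p.2))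

def pvLk (cs : List Char) : Option String :=
  (pvPairs.find? (fun p => p.1 == cs)).map (·.2)

def pvScanL (cs : List Char) : List (List Char) → String
  | [] => ""
  | k :: ks => if k.isPrefixOf cs then (pvLk k).getD "" else pvScanL cs ks

-- a countdown formulation: look up cs.take j for j = i, i-1, …, 1 (the common yardstick of both proofs)
def pvLoopL (cs : List Char) : Nat → String
  | 0 => ""
  | i + 1 =>
      if (pvLk (cs.take (i + 1))).isSome then (pvLk (cs.take (i + 1))).getD ""
      else pvLoopL cs i

-- list-level mirror of B's pass: the expanded (key, io) table and the best-so-far step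
def pvBList : List (List Char × String) :=
  pvIOGroups.flatMap (fun g => (PySem.Str.split₀ g.2).map (fun k => (k.toList, g.1)))

def pvStep (cs : List Char) (acc : Int × String) (p : List Char × String) : Int × String :=
  if acc.1 < (p.1.length : Int) ∧ PySem.Chars.startswith cs p.1 = true then ((p.1.length : Int), p.2) else acc

def pvInv (cs : List Char) (acc : Int × String) : Prop :=
  (acc.1 = 0 ∧ acc.2 = "") ∨
    ∃ n : Nat, acc.1 = (n : Int) ∧ (cs.take n).length = n ∧ pvLk (cs.take n) = some acc.2

-- the sorted key list, by length, as char lists: the length-4, then length-3, then length-2 keys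
def pvG4 : List (List Char) := [['R', 'Z', 'S', 'O'], ['R', 'Z', 'S', 'C'], ['M', 'Z', 'S', 'O'], ['M', 'Z', 'S', 'C'], ['E', 'Z', 'S', 'O'], ['E', 'Z', 'S', 'C'], ['B', 'Z', 'S', 'O'], ['B', 'Z', 'S', 'C'], ['P', 'S', 'L', 'L'], ['P', 'S', 'H', 'H'], ['L', 'S', 'L', 'L'], ['L', 'S', 'H', 'H'], ['T', 'S', 'L', 'L'], ['T', 'S', 'H', 'H'], ['R', 'S', 'O', 'V']]
def pvG3 : List (List Char) := [['P', 'I', 'T'], ['T', 'I', 'T'], ['F', 'I', 'T'], ['L', 'I', 'T'], ['A', 'I', 'T'], ['P', 'D', 'T'], ['W', 'I', 'T'], ['V', 'I', 'T'], ['S', 'I', 'T'], ['Z', 'S', 'C'], ['Z', 'S', 'O'], ['P', 'S', 'L'], ['P', 'S', 'H'], ['L', 'S', 'L'], ['L', 'S', 'H'], ['T', 'S', 'L'], ['T', 'S', 'H'], ['F', 'S', 'L'], ['F', 'S', 'H'], ['M', 'X', 'S'], ['S', 'O', 'V'], ['M', 'O', 'V']]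
def pvG2 : List (List Char) := [['T', 'E'], ['P', 'T'], ['T', 'T'], ['F', 'T'], ['L', 'T'], ['A', 'T'], ['E', 'T'], ['I', 'T'], ['T', 'Y'], ['P', 'Y'], ['F', 'Y'], ['L', 'Y'], ['T', 'V'], ['P', 'V'], ['F', 'V'], ['L', 'V'], ['Z', 'S'], ['F', 'S'], ['X', 'S'], ['X', 'V'], ['X', 'Y'], ['S', 'V']]

lemma pv_beq_toList (a b : String) : (a == b) = (a.toList == b.toList) := by
  rcases h : a.toList == b.toList
  · simp_all [String.ext_iff]
  · simp_all [String.ext_iff]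

set_option maxRecDepth 16384 in
lemma pv_items : pvIOMap.items = pvSPairs := by decide

lemma pv_get?_eq (t : String) : PySem.Dict.get? pvIOMap t = pvLk t.toList := by
  have hpred : ((fun (p : List Char × String) => p.1 == t.toList) ∘
      (fun (p : String × String) => (p.1.toList, p.2))) = fun (p : String × String) => p.1 == t := by
    funext p
    simp only [Function.comp]
    rw [pv_beq_toList]
  simp only [PySem.Dict.get?, pv_items, pvLk, pvPairs, List.find?_map, hpred, Option.map_map]
  cases pvSPairs.find? (fun p => p.1 == t) <;> rfl

lemma pv_contains_eq (t : String) : PySem.Dict.contains pvIOMap t = (pvLk t.toList).isSome := by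
  rw [PySem.Dict.contains_eq_isSome_get?, pv_get?_eq]

set_option maxRecDepth 16384 in
lemma pv_sorted_keys :
    (PySem.List.sorted (PySem.Dict.keys pvIOMap) (fun k => PySem.Str.len k) true).map String.toList
      = pvG4 ++ (pvG3 ++ (pvG2 ++ [])) := by decide

lemma pv_scan_eq (t : String) (ks : List String) :
    pvScanA t ks = pvScanL t.toList (ks.map String.toList) := by
  induction ks with
  | nil => rfl
  | cons k ks ih =>
      simp only [pvScanA, pvScanL, List.map, PySem.Str.startswith_eq, PySem.Chars.startswith,
        pv_get?_eq, ih]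

-- facts about the key tables, by evaluation
lemma pv_pairs_len : ∀ p ∈ pvPairs, 2 ≤ p.1.length ∧ p.1.length ≤ 4 := by decide

lemma pv_mem_g4 : ∀ p ∈ pvPairs, p.1.length = 4 → p.1 ∈ pvG4 := by decide
lemma pv_mem_g3 : ∀ p ∈ pvPairs, p.1.length = 3 → p.1 ∈ pvG3 := by decide
lemma pv_mem_g2 : ∀ p ∈ pvPairs, p.1.length = 2 → p.1 ∈ pvG2 := by decide
lemma pv_g4_len : ∀ k ∈ pvG4, k.length = 4 := by decide
lemma pv_g3_len : ∀ k ∈ pvG3, k.length = 3 := by decide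
lemma pv_g2_len : ∀ k ∈ pvG2, k.length = 2 := by decide
lemma pv_g4_some : ∀ k ∈ pvG4, (pvLk k).isSome = true := by decide
lemma pv_g3_some : ∀ k ∈ pvG3, (pvLk k).isSome = true := by decide
lemma pv_g2_some : ∀ k ∈ pvG2, (pvLk k).isSome = true := by decide

set_option maxRecDepth 65536 in
lemma pv_bkeys : ∀ p ∈ pvBList, pvLk p.1 = some p.2 := by decide

set_option maxRecDepth 65536 in
lemma pv_cover : ∀ p ∈ pvPairs, p ∈ pvBList := by decide

lemma pv_lk_some (cs : List Char) (v : String) (h : pvLk cs = some v) : (cs, v) ∈ pvPairs := by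
  unfold pvLk at h
  cases hf : pvPairs.find? (fun p => p.1 == cs) with
  | none => rw [hf] at h; simp at h
  | some p =>
      rw [hf] at h
      simp only [Option.map_some, Option.some.injEq] at h
      have hp : p.1 = cs := eq_of_beq (by simpa using List.find?_some hf)
      have hm := List.mem_of_find?_eq_some hf
      rw [← h, ← hp]
      exact hm

lemma pv_lk_len (cs : List Char) (h : cs.length < 2 ∨ 4 < cs.length) : pvLk cs = none := by
  cases hx : pvLk cs with
  | none => rfl
  | some v =>
      have := pv_pairs_len _ (pv_lk_some cs v hx)
      simp only at this
      omega

lemma pv_loopL_succ (cs : List Char) (i : Nat) :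
    pvLoopL cs (i + 1) =
      if (pvLk (cs.take (i + 1))).isSome then (pvLk (cs.take (i + 1))).getD ""
      else pvLoopL cs i := rfl

lemma pv_scan_skip (cs : List Char) (ks r : List (List Char))
    (h : ∀ k ∈ ks, ¬ k <+: cs) : pvScanL cs (ks ++ r) = pvScanL cs r := by
  induction ks with
  | nil => rfl
  | cons k ks ih =>
      have hk : k.isPrefixOf cs = false := by
        rw [Bool.eq_false_iff]
        intro hx
        exact h k (by simp) (List.isPrefixOf_iff_prefix.mp hx)
      simp only [List.cons_append, pvScanL, hk, Bool.false_eq_true, if_false]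
      exact ih (fun k hk => h k (by simp [hk]))

lemma pv_scan_hit (cs : List Char) (ks r : List (List Char)) (k0 : List Char)
    (hmem : k0 ∈ ks) (hpre : k0 <+: cs) (huniq : ∀ k ∈ ks, k <+: cs → k = k0) :
    pvScanL cs (ks ++ r) = (pvLk k0).getD "" := by
  induction ks with
  | nil => cases hmem
  | cons k ks ih =>
      by_cases hp : k <+: cs
      · have hk0 : k = k0 := huniq k (by simp) hp
        subst hk0
        have hk : k.isPrefixOf cs = true := List.isPrefixOf_iff_prefix.mpr hp
        simp only [List.cons_append, pvScanL, hk, if_true]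
      · have hk : k.isPrefixOf cs = false := by
          rw [Bool.eq_false_iff]; intro hx; exact hp (List.isPrefixOf_iff_prefix.mp hx)
        simp only [List.cons_append, pvScanL, hk, Bool.false_eq_true, if_false]
        have hm : k0 ∈ ks := by
          rcases List.mem_cons.mp hmem with h1 | h1
          · exact absurd (h1 ▸ hpre) hp
          · exact h1
        exact ih hm (fun k hk hkp => huniq k (by simp [hk]) hkp)

-- one level of the scan: the length-j group either hits take j cs or is skipped entirely
lemma pv_level_skip (cs : List Char) (G r : List (List Char)) (j : Nat)
    (hlen : ∀ k ∈ G, k.length = j) (hsm : ∀ k ∈ G, (pvLk k).isSome = true)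
    (hnone : pvLk (cs.take j) = none) : pvScanL cs (G ++ r) = pvScanL cs r := by
  apply pv_scan_skip
  intro k hk hpre
  have h1 : k = cs.take j := by
    rw [← hlen k hk]
    exact List.prefix_iff_eq_take.mp hpre
  have h2 := hsm k hk
  rw [h1, hnone] at h2
  simp at h2

lemma pv_level_hit (cs : List Char) (G r : List (List Char)) (j : Nat) (v : String)
    (hlen : ∀ k ∈ G, k.length = j) (hG : cs.take j ∈ G)
    (hsome : pvLk (cs.take j) = some v) : pvScanL cs (G ++ r) = v := by
  rw [pv_scan_hit cs G r (cs.take j) hG (List.take_prefix j cs)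
      (fun k hk hkp => by rw [← hlen k hk]; exact List.prefix_iff_eq_take.mp hkp), hsome]
  rfl

lemma pv_B1 (cs : List Char) : pvLoopL cs (min cs.length 4) = pvLoopL cs 4 := by
  by_cases h4 : 4 ≤ cs.length
  · rw [Nat.min_eq_right h4]
  · rw [Nat.min_eq_left (by omega)]
    have key : ∀ i, cs.length ≤ i → pvLoopL cs i = pvLoopL cs cs.length := by
      intro i hi
      induction i, hi using Nat.le_induction with
      | base => rfl
      | succ i hi ih =>
          have ht : cs.take (i + 1) = cs := List.take_of_length_le (by omega)
          rcases hk : pvLk cs with _ | v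
          · rw [pv_loopL_succ, ht, hk]
            simp only [Option.isSome_none, Bool.false_eq_true, if_false]
            exact ih
          · have h2 : 2 ≤ cs.length := by
              have := pv_pairs_len _ (pv_lk_some cs v hk)
              simp only at this
              omega
            obtain ⟨m, hm⟩ : ∃ m, cs.length = m + 1 := ⟨cs.length - 1, by omega⟩
            rw [pv_loopL_succ, ht, hk, hm, pv_loopL_succ,
              show cs.take (m + 1) = cs from List.take_of_length_le (by omega), hk]
            simp
    exact (key 4 (by omega)).symm

-- A's side: direct lookup + sorted scan = the countdown loop
lemma pv_main (cs : List Char) :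
    (if (pvLk cs).isSome then (pvLk cs).getD "" else pvScanL cs (pvG4 ++ (pvG3 ++ (pvG2 ++ []))))
      = pvLoopL cs (min cs.length 4) := by
  rw [pv_B1]
  rcases h : pvLk cs with _ | v
  · simp only [Option.isSome_none, Bool.false_eq_true, if_false]
    have hfit : ∀ j : Nat, 0 < j → ∀ v, pvLk (cs.take j) = some v → j ≤ cs.length := by
      intro j hj v hv
      by_contra hc
      rw [List.take_of_length_le (by omega), h] at hv
      cases hv
    rcases h4 : pvLk (cs.take 4) with _ | v4
    · rw [pv_level_skip cs pvG4 _ 4 pv_g4_len pv_g4_some h4, pv_loopL_succ, h4]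
      simp only [Option.isSome_none, Bool.false_eq_true, if_false]
      rcases h3 : pvLk (cs.take 3) with _ | v3
      · rw [pv_level_skip cs pvG3 _ 3 pv_g3_len pv_g3_some h3, pv_loopL_succ, h3]
        simp only [Option.isSome_none, Bool.false_eq_true, if_false]
        rcases h2 : pvLk (cs.take 2) with _ | v2
        · rw [pv_level_skip cs pvG2 _ 2 pv_g2_len pv_g2_some h2, pv_loopL_succ, h2]
          simp only [Option.isSome_none, Bool.false_eq_true, if_false]
          have h1 : pvLk (cs.take 1) = none := by
            apply pv_lk_len; left; rw [List.length_take]; omega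
          rw [pv_loopL_succ, h1]
          simp only [Option.isSome_none, Bool.false_eq_true, if_false]
          rfl
        · have hj := hfit 2 (by omega) v2 h2
          have hmem : cs.take 2 ∈ pvG2 :=
            pv_mem_g2 _ (pv_lk_some _ _ h2) (by rw [List.length_take]; omega)
          rw [pv_level_hit cs pvG2 _ 2 v2 pv_g2_len hmem h2, pv_loopL_succ, h2]
          rfl
      · have hj := hfit 3 (by omega) v3 h3
        have hmem : cs.take 3 ∈ pvG3 :=
          pv_mem_g3 _ (pv_lk_some _ _ h3) (by rw [List.length_take]; omega)
        rw [pv_level_hit cs pvG3 _ 3 v3 pv_g3_len hmem h3, pv_loopL_succ, h3]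
        rfl
    · have hj := hfit 4 (by omega) v4 h4
      have hmem : cs.take 4 ∈ pvG4 :=
        pv_mem_g4 _ (pv_lk_some _ _ h4) (by rw [List.length_take]; omega)
      rw [pv_level_hit cs pvG4 _ 4 v4 pv_g4_len hmem h4, pv_loopL_succ, h4]
      rfl
  · have hle : cs.length ≤ 4 := by
      have := pv_pairs_len _ (pv_lk_some cs v h)
      simp only at this
      omega
    rw [pv_loopL_succ, List.take_of_length_le hle, h]
    rfl

-- B's side: the port's nested fold is the flat fold over pvBList
lemma pv_alt_fold (t : String) :
    (pvIOGroups.foldl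
      (fun acc g =>
        (PySem.Str.split₀ g.2).foldl
          (fun acc key =>
            if acc.1 < PySem.Str.len key ∧ PySem.Str.startswith t key = true then
              (PySem.Str.len key, g.1)
            else acc)
          acc)
      ((0 : Int), ""))
      = pvBList.foldl (pvStep t.toList) ((0 : Int), "") := by
  rw [pvBList, List.foldl_flatMap]
  simp only [List.foldl_map, pvStep, PySem.Str.len_eq, PySem.Str.startswith_eq]

-- fold invariants
lemma pv_fold_ge (cs : List Char) (P : List (List Char × String)) :
    ∀ acc : Int × String, acc.1 ≤ (P.foldl (pvStep cs) acc).1 := by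
  induction P with
  | nil => intro acc; exact le_refl _
  | cons q P ih =>
      intro acc
      refine le_trans ?_ (ih (pvStep cs acc q))
      unfold pvStep
      split_ifs with h
      · exact le_of_lt h.1
      · exact le_refl _

lemma pv_fold_complete (cs : List Char) (P : List (List Char × String)) :
    ∀ (acc : Int × String) (p : List Char × String), p ∈ P →
      PySem.Chars.startswith cs p.1 = true → (p.1.length : Int) ≤ (P.foldl (pvStep cs) acc).1 := by
  induction P with
  | nil => intro _ _ h; cases h
  | cons q P ih =>
      intro acc p hp hsw
      rcases List.mem_cons.mp hp with h1 | h1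
      · subst h1
        refine le_trans ?_ (pv_fold_ge cs P (pvStep cs acc p))
        unfold pvStep
        split_ifs with h
        · exact le_refl _
        · rw [Classical.not_and_iff_not_or_not] at h
          rcases h with h | h
          · omega
          · exact absurd hsw h
      · exact ih (pvStep cs acc q) p h1 hsw

lemma pv_fold_inv (cs : List Char) (P : List (List Char × String))
    (hP : ∀ p ∈ P, pvLk p.1 = some p.2) :
    ∀ acc : Int × String, pvInv cs acc → pvInv cs (P.foldl (pvStep cs) acc) := by
  induction P with
  | nil => intro acc h; exact h
  | cons q P ih =>
      intro acc hacc
      refine ih (fun p hp => hP p (List.mem_cons_of_mem _ hp)) (pvStep cs acc q) ?_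
      unfold pvStep
      split_ifs with h
      · right
        refine ⟨q.1.length, rfl, ?_, ?_⟩
        · have hpre : q.1 <+: cs := (PySem.Chars.startswith_iff cs q.1).mp h.2
          rw [← List.prefix_iff_eq_take.mp hpre]
        · have hpre : q.1 <+: cs := (PySem.Chars.startswith_iff cs q.1).mp h.2
          rw [← List.prefix_iff_eq_take.mp hpre]
          exact hP q (List.mem_cons_self)
      · exact hacc

-- B's side: the flat fold = the countdown loop
lemma pv_fold_main (cs : List Char) :
    pvLoopL cs 4 = (pvBList.foldl (pvStep cs) ((0 : Int), "")).2 := by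
  have hInv := pv_fold_inv cs pvBList pv_bkeys ((0 : Int), "") (Or.inl ⟨rfl, rfl⟩)
  have hcomp : ∀ p ∈ pvPairs, p.1 <+: cs →
      (p.1.length : Int) ≤ (pvBList.foldl (pvStep cs) ((0 : Int), "")).1 := by
    intro p hp hpre
    exact pv_fold_complete cs pvBList ((0 : Int), "") p (pv_cover p hp)
      ((PySem.Chars.startswith_iff cs p.1).mpr hpre)
  rcases hInv with ⟨h1, h2⟩ | ⟨n, hn1, hn2, hn3⟩
  · -- nothing matched: every pvLk (cs.take j) is none
    have hnone : ∀ j : Nat, pvLk (cs.take j) = none := by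
      intro j
      cases hx : pvLk (cs.take j) with
      | none => rfl
      | some v =>
          have hmem := pv_lk_some _ _ hx
          have hlen := pv_pairs_len _ hmem
          have := hcomp _ hmem (List.take_prefix j cs)
          rw [h1] at this
          simp only at this hlen
          omega
    rw [show (4 : Nat) = 3 + 1 from rfl, pv_loopL_succ, hnone]
    simp only [Option.isSome_none, Bool.false_eq_true, if_false]
    rw [show (3 : Nat) = 2 + 1 from rfl, pv_loopL_succ, hnone]
    simp only [Option.isSome_none, Bool.false_eq_true, if_false]
    rw [show (2 : Nat) = 1 + 1 from rfl, pv_loopL_succ, hnone]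
    simp only [Option.isSome_none, Bool.false_eq_true, if_false]
    rw [show (1 : Nat) = 0 + 1 from rfl, pv_loopL_succ, hnone]
    simp only [Option.isSome_none, Bool.false_eq_true, if_false]
    exact h2.symm
  · -- the best is a key of length n; the loop returns its value from level n upward
    set r := pvBList.foldl (pvStep cs) ((0 : Int), "") with hr
    have hmem := pv_lk_some _ _ hn3
    have hlen := pv_pairs_len _ hmem
    simp only [hn2] at hlen
    have hup : ∀ d : Nat, n + d ≤ 4 → pvLoopL cs (n + d) = r.2 := by
      intro d
      induction d with
      | zero =>
          intro _
          obtain ⟨m, hm⟩ : ∃ m, n = m + 1 := ⟨n - 1, by omega⟩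
          rw [Nat.add_zero, hm, pv_loopL_succ, ← hm, hn3]
          simp
      | succ d ihd =>
          intro hd4
          rw [show n + (d + 1) = (n + d) + 1 from rfl, pv_loopL_succ]
          cases hx : pvLk (cs.take (n + d + 1)) with
          | none =>
              simp only [Option.isSome_none, Bool.false_eq_true, if_false]
              exact ihd (by omega)
          | some w =>
              have hkm := pv_lk_some _ _ hx
              have hkl : (cs.take (n + d + 1)).length ≤ n := by
                have h' := hcomp _ hkm (List.take_prefix _ cs)
                simp only at h'
                rw [hn1] at h'
                exact_mod_cast h'
              rw [List.length_take] at hkl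
              have hnle : n ≤ cs.length := by
                rw [List.length_take] at hn2; omega
              have hcseq : cs.take (n + d + 1) = cs := List.take_of_length_le (by omega)
              have hcsn : cs.take n = cs := List.take_of_length_le (by omega)
              have hw : w = r.2 := by
                have h1 : pvLk cs = some w := by rw [← hcseq]; exact hx
                have h2 : pvLk cs = some r.2 := by rw [← hcsn]; exact hn3
                exact Option.some.inj (h1.symm.trans h2)
              simp [hw]
    have := hup (4 - n) (by omega)
    rwa [show n + (4 - n) = 4 by omega] at this

-- ===== VERDICT (by name: the statement is the Claim_ definition above) =====
theorem infer_io_type_from_instrument_type_spec : Claim_equal_infer_io_type_from_instrument_type := by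
  intro s _
  show infer_io_type_from_instrument_type s = infer_io_type_from_instrument_type_alt s
  unfold infer_io_type_from_instrument_type infer_io_type_from_instrument_type_alt
  by_cases hs : s == ""
  · simp [hs]
  · simp only [hs, if_false, Bool.false_eq_true]
    rw [pv_alt_fold, pv_scan_eq, pv_sorted_keys, pv_contains_eq, pv_get?_eq, pv_main, pv_B1,
      pv_fold_main]
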